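-- pv_equiv track=rewrite | github.com/MFaisalZaki/pyBehaviourPlanning-EvalToolkit | exp-analyzer/operations/utilities.py | remove_entries
-- ===== SOURCE A (Python) =====
-- def remove_entries(dict_sat, _to_remove_keys):
--     for domain, problem, q, k in _to_remove_keys:
--         if domain in dict_sat and problem in dict_sat[domain] and q in dict_sat[domain][problem] and k in dict_sat[domain][problem][q]:
--             del dict_sat[domain][problem][q][k]
--         if domain in dict_sat and problem in dict_sat[domain] and q in dict_sat[domain][problem] and len(dict_sat[domain][problem][q]) == 0:
--             del dict_sat[domain][problem][q]
--         if domain in dict_sat and problem in dict_sat[domain] and len(dict_sat[domain][problem]) == 0: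
--             del dict_sat[domain][problem]
--         if domain in dict_sat and len(dict_sat[domain]) == 0:
--             del dict_sat[domain]
--     return dict_sat
-- ===== SOURCE B (Python) =====
-- def _prune(d, path):
--     head = path[0]
--     if len(path) == 1:
--         if head in d:
--             del d[head]
--         return
--     if head in d:
--         _prune(d[head], path[1:])
--         if len(d[head]) == 0:
--             del d[head]
--
-- def remove_entries(dict_sat, _to_remove_keys):
--     for path in _to_remove_keys:
--         _prune(dict_sat, list(path))
--     return dict_sat
-- ===== Notes on version B (the rewrite author's own statement) =====
-- stated objective: simpler
-- what changed: Replaces A's four flat guarded if-blocks (each re-scanning the whole nested-dict path from the top after every deletion) with a single recursive helper _prune(d, path) that descends the key path once and prunes empty dicts on the way back up.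
import Mathlib
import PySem

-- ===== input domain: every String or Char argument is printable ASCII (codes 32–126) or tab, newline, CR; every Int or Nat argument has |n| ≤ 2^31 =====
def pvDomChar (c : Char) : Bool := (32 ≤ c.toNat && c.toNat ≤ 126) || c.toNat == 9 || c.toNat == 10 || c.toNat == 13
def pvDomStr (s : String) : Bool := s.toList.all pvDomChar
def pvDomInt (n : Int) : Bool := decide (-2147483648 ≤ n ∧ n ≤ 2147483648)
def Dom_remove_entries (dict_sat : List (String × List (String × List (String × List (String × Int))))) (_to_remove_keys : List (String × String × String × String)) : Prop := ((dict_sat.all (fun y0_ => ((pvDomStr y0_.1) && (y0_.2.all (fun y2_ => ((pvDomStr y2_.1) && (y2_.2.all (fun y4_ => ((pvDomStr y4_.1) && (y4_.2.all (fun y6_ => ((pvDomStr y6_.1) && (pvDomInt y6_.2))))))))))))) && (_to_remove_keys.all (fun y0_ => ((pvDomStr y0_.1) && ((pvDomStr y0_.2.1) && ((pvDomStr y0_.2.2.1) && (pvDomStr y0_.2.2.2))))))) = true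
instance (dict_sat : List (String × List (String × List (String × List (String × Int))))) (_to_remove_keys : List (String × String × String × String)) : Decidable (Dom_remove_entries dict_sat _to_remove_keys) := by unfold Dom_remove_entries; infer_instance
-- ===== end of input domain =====

-- B replaces A's four flat re-scanning `if` cascades with one recursive descend-and-prune
-- helper (objective: simpler). Both Pythons mutate dict_sat in place identically; the
-- equivalence proved here is about the returned value.

-- Shared Python-dict primitives on association lists (first-match lookup, in-place overwrite, del):
-- d[k] / `k in d`
def aget? {α : Type} (d : List (String × α)) (k : String) : Option α :=
  match d with
  | [] => none
  | (k', v) :: t => if k' == k then some v else aget? t k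

-- d[k] = v  (overwrite keeps position; new key appends — matches Python dict)
def aset {α : Type} (d : List (String × α)) (k : String) (v : α) : List (String × α) :=
  match d with
  | [] => [(k, v)]
  | (k', w) :: t => if k' == k then (k', v) :: t else (k', w) :: aset t k v

-- del d[k]  (no-op when absent; in Python the callers guard with `k in d` first)
def aerase {α : Type} (d : List (String × α)) (k : String) : List (String × α) :=
  match d with
  | [] => []
  | (k', v) :: t => if k' == k then t else (k', v) :: aerase t k

-- ===== PORT A =====
-- one iteration of A's for-loop: the four sequential guarded blocks, each re-scanning from the top
def stepA (d : List (String × List (String × List (String × List (String × Int)))))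
    (key : String × String × String × String) :
    List (String × List (String × List (String × List (String × Int)))) :=
  let (a, p, q, k) := key
  -- if domain in d and problem in d[domain] and q in ... and k in ...: del d[a][p][q][k]
  let d1 :=
    match aget? d a with
    | none => d
    | some l1 =>
      match aget? l1 p with
      | none => d
      | some l2 =>
        match aget? l2 q with
        | none => d
        | some l3 =>
          if (aget? l3 k).isSome then aset d a (aset l1 p (aset l2 q (aerase l3 k))) else d
  -- if … and len(d[a][p][q]) == 0: del d[a][p][q]
  let d2 :=
    match aget? d1 a with
    | none => d1
    | some l1 =>
      match aget? l1 p with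
      | none => d1
      | some l2 =>
        match aget? l2 q with
        | none => d1
        | some l3 => if l3.length == 0 then aset d1 a (aset l1 p (aerase l2 q)) else d1
  -- if … and len(d[a][p]) == 0: del d[a][p]
  let d3 :=
    match aget? d2 a with
    | none => d2
    | some l1 =>
      match aget? l1 p with
      | none => d2
      | some l2 => if l2.length == 0 then aset d2 a (aerase l1 p) else d2
  -- if domain in d and len(d[a]) == 0: del d[a]
  match aget? d3 a with
  | none => d3
  | some l1 => if l1.length == 0 then aerase d3 a else d3

def remove_entries (dict_sat : List (String × List (String × List (String × List (String × Int))))) (_to_remove_keys : List (String × String × String × String)) : List (String × List (String × List (String × List (String × Int)))) :=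
  _to_remove_keys.foldl stepA dict_sat

-- ===== PORT B =====
-- Source B's generic recursive _prune(d, path) monomorphised per depth (the nested dict type
-- changes at each level, so Lean needs one instance per level; each is the same two lines).
-- path = [k]: if k in d: del d[k]
def prune1 (d : List (String × Int)) (k : String) : List (String × Int) :=
  if (aget? d k).isSome then aerase d k else d

-- if head in d: _prune(d[head], rest); if len(d[head]) == 0: del d[head]
def prune2 (d : List (String × List (String × Int))) (q k : String) :
    List (String × List (String × Int)) :=
  match aget? d q with
  | none => d
  | some inner =>
    let inner' := prune1 inner k
    let d' := aset d q inner'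
    if inner'.length == 0 then aerase d' q else d'

def prune3 (d : List (String × List (String × List (String × Int)))) (p q k : String) :
    List (String × List (String × List (String × Int))) :=
  match aget? d p with
  | none => d
  | some inner =>
    let inner' := prune2 inner q k
    let d' := aset d p inner'
    if inner'.length == 0 then aerase d' p else d'

def prune4 (d : List (String × List (String × List (String × List (String × Int))))) (a p q k : String) :
    List (String × List (String × List (String × List (String × Int)))) :=
  match aget? d a with
  | none => d
  | some inner =>
    let inner' := prune3 inner p q k
    let d' := aset d a inner'
    if inner'.length == 0 then aerase d' a else d'

def remove_entries_alt (dict_sat : List (String × List (String × List (String × List (String × Int))))) (_to_remove_keys : List (String × String × String × String)) : List (String × List (String × List (String × List (String × Int)))) :=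
  _to_remove_keys.foldl (fun d key => prune4 d key.1 key.2.1 key.2.2.1 key.2.2.2) dict_sat

-- ===== PRECONDITION & SPEC =====
def Spec_remove_entries (dict_sat : List (String × List (String × List (String × List (String × Int))))) (_to_remove_keys : List (String × String × String × String)) (out : List (String × List (String × List (String × List (String × Int))))) : Prop := out = remove_entries_alt dict_sat _to_remove_keys
instance (dict_sat : List (String × List (String × List (String × List (String × Int))))) (_to_remove_keys : List (String × String × String × String)) (out : List (String × List (String × List (String × List (String × Int))))) : Decidable (Spec_remove_entries dict_sat _to_remove_keys out) := by
  unfold Spec_remove_entries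
  have d1 : DecidableEq (List (String × Int)) := inferInstance
  have d2 : DecidableEq (List (String × List (String × Int))) := inferInstance
  have d3 : DecidableEq (List (String × List (String × List (String × Int)))) := inferInstance
  have d4 : DecidableEq (List (String × List (String × List (String × List (String × Int))))) := inferInstance
  exact d4 _ _

-- ===== CLAIM (what is proved, stated in full; the proofs are below) =====
def Claim_equal_remove_entries : Prop := ∀ (dict_sat : List (String × List (String × List (String × List (String × Int))))) (_to_remove_keys : List (String × String × String × String)), Dom_remove_entries dict_sat _to_remove_keys → Spec_remove_entries dict_sat _to_remove_keys (remove_entries dict_sat _to_remove_keys)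

-- ===== LEMMAS AND PROOFS =====

theorem aget?_aset_self {α : Type} (d : List (String × α)) (k : String) (v : α) :
    aget? (aset d k v) k = some v := by
  induction d with
  | nil => simp [aget?, aset]
  | cons h t ih =>
    obtain ⟨k', w⟩ := h
    by_cases hk : k' == k <;> simp [aget?, aset, hk, ih]

theorem aset_aset {α : Type} (d : List (String × α)) (k : String) (v w : α) :
    aset (aset d k v) k w = aset d k w := by
  induction d with
  | nil => simp [aset]
  | cons h t ih =>
    obtain ⟨k', u⟩ := h
    by_cases hk : k' == k <;> simp [aset, hk, ih]

theorem aerase_aset {α : Type} (d : List (String × α)) (k : String) (v : α) :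
    aerase (aset d k v) k = aerase d k := by
  induction d with
  | nil => simp [aset, aerase]
  | cons h t ih =>
    obtain ⟨k', u⟩ := h
    by_cases hk : k' == k <;> simp [aset, aerase, hk, ih]

theorem aset_self {α : Type} {d : List (String × α)} {k : String} {v : α}
    (h : aget? d k = some v) : aset d k v = d := by
  induction d with
  | nil => simp [aget?] at h
  | cons hd t ih =>
    obtain ⟨k', u⟩ := hd
    by_cases hk : k' == k
    · simp [aget?, hk] at h
      simp [aset, hk, h]
    · simp [aget?, hk] at h
      simp [aset, hk, ih h]

theorem aset_len_beq {α : Type} (d : List (String × α)) (k : String) (v : α) :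
    ((aset d k v).length == 0) = false := by
  cases d with
  | nil => simp [aset]
  | cons h t =>
    obtain ⟨k', w⟩ := h
    by_cases hk : k' == k <;> simp [aset, hk]

theorem step_eq (d : List (String × List (String × List (String × List (String × Int)))))
    (key : String × String × String × String) :
    stepA d key = prune4 d key.1 key.2.1 key.2.2.1 key.2.2.2 := by
  obtain ⟨a, p, q, k⟩ := key
  simp only [stepA, prune4]
  cases h1 : aget? d a with
  | none => simp [h1]
  | some l1 =>
    simp only [prune3]
    cases h2 : aget? l1 p with
    | none =>
      simp [h1, h2, aset_self h1, aerase_aset]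
    | some l2 =>
      simp only [prune2]
      cases h3 : aget? l2 q with
      | none =>
        simp only [h1, h2, h3]
        by_cases e2 : l2.length = 0 <;>
          simp [e2, h1, h2, aget?_aset_self, aerase_aset, aset_aset, aset_len_beq,
                aset_self h1, aset_self h2]
      | some l3 =>
        simp only [prune1]
        by_cases hk : (aget? l3 k).isSome
        · -- k present: A deletes it, then each level is re-fetched through the rewritten dict
          simp only [hk, if_true]
          simp only [h1, h2, h3, aget?_aset_self, aerase_aset, aset_aset, aset_len_beq,
                     Bool.false_eq_true, if_false]
          by_cases e3 : (aerase l3 k).length = 0 <;>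
            simp only [e3, beq_iff_eq, if_true, if_false, aget?_aset_self, aerase_aset,
                       aset_aset, aset_len_beq, Bool.false_eq_true, ite_true, ite_false,
                       if_pos, reduceIte] <;>
          · by_cases e2 : (aerase l2 q).length = 0 <;>
            by_cases e1 : (aerase l1 p).length = 0 <;>
              simp [e2, e1, e3, aget?_aset_self, aerase_aset, aset_aset, aset_len_beq]
        · -- k absent: step 1 is a no-op and every aset writes back the fetched value
          have hne1 : l1 ≠ [] := by intro h; subst h; simp [aget?] at h2
          have hne2 : l2 ≠ [] := by intro h; subst h; simp [aget?] at h3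
          simp only [hk, Bool.false_eq_true, if_false, aset_self h3, aset_self h2, aset_self h1,
                     aerase_aset]
          simp only [h1, h2, h3]
          by_cases e3 : l3.length = 0 <;>
            simp only [e3, beq_iff_eq, if_true, if_false, reduceIte] <;>
          · by_cases e2 : (aerase l2 q).length = 0 <;>
            by_cases e1 : (aerase l1 p).length = 0 <;>
              simp [e1, e2, e3, h1, h2, h3, hne1, hne2, aget?_aset_self, aerase_aset, aset_aset,
                    aset_len_beq, aset_self h1, aset_self h2]

theorem foldl_step_eq (keys : List (String × String × String × String))
    (d : List (String × List (String × List (String × List (String × Int))))) :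
    keys.foldl stepA d = keys.foldl (fun d key => prune4 d key.1 key.2.1 key.2.2.1 key.2.2.2) d := by
  induction keys generalizing d with
  | nil => rfl
  | cons hd t ih => simp only [List.foldl_cons, step_eq, ih]

-- ===== VERDICT (by name: the statement is the Claim_ definition above) =====
theorem remove_entries_spec : Claim_equal_remove_entries := by
  intro dict_sat keys _
  unfold Spec_remove_entries remove_entries remove_entries_alt
  exact foldl_step_eq keys dict_sat
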